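-- pv_equiv track=rewrite | github.com/MrStickyPiston/ancient-greek-analysis | data/scripts/parse_datadump.py | process_conjugations
-- ===== SOURCE A (Python) =====
-- def longest_substr(data):
--     substr = ''
--
--     word = data[0]
--
--     if len(data) > 1 and len(word) > 0:
--         for i in range(len(word)):
--             for j in range(len(word) - i + 1):
--                 if j > len(substr) and all(word[i:i + j] in x for x in data):
--                     substr = word[i:i + j]
--
--     return substr
--
-- def process_conjugations(conjugations):
--     words = [conjugation[2] for conjugation in conjugations]
--
--     root = longest_substr(words)
--
--     processed = []
--
--     for conjugation in conjugations:
--         if root == '':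
--             prefix = ''
--             suffix = conjugation[2]
--         else:
--             prefix, suffix = conjugation[2].split(root, 1)
--
--         processed.append((conjugation[0], conjugation[1], root, prefix, suffix, conjugation[3], conjugation[4]))
--
--     return processed
-- ===== SOURCE B (Python) =====
-- # B: binary search on the common-substring length (longest common substring of all
-- # words, earliest start in the first word), then partition each word around it.
-- def _first_common_start(words, word, m):
--     # first index i such that word[i:i+m] occurs in every word, else None
--     for i in range(len(word) + 1 - m):
--         if all(word[i:i + m] in x for x in words):
--             return i
--     return None
--
-- def _longest_common(words):
--     word = words[0]
--     lo, hi = 1, len(word)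
--     best = ''
--     while lo <= hi:
--         mid = (lo + hi) // 2
--         i = _first_common_start(words, word, mid)
--         if i is None:
--             hi = mid - 1
--         else:
--             best = word[i:i + mid]
--             lo = mid + 1
--     return best
--
-- def process_conjugations(conjugations):
--     if not conjugations:
--         return []
--     words = [c[2] for c in conjugations]
--     root = _longest_common(words) if len(words) > 1 else ''
--     def parts(w):
--         if root:
--             pre, _, suf = w.partition(root)
--         else:
--             pre, suf = '', w
--         return pre, suf
--     return [(c[0], c[1], root) + parts(c[2]) + (c[3], c[4]) for c in conjugations]
-- ===== Notes on version B (the rewrite author's own statement) =====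
-- stated objective: faster
-- what changed: A grows the common substring by scanning every (start, length) pair of the first word with a full membership test for each (O(N*L^3) substring checks); B binary-searches on the length of the longest common substring, checking one length per step via a first-match scan (O(N*L^2*log L) with the same earliest-start tie-break), and splits each word with str.partition instead of str.split(root, 1).
-- outside the precondition, e.g. on process_conjugations([]): A raises IndexError, B returns []
import Mathlib
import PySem

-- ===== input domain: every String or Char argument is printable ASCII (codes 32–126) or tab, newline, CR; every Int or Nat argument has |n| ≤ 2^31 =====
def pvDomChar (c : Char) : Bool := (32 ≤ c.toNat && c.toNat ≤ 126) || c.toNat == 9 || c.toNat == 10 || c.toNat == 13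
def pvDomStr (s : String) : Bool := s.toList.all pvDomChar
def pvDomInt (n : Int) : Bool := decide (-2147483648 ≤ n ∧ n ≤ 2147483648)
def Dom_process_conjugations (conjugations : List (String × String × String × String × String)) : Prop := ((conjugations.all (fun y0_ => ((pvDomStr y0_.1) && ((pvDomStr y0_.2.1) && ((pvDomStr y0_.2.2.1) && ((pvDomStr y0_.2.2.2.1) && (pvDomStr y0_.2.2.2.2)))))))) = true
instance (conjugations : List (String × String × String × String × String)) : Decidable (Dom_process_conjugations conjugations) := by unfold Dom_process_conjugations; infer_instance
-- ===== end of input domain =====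

-- B replaces A's cubic scan over all (start, length) pairs by a binary search on the
-- length of the common substring; equivalence of the return values is proved below.
-- Strings are modeled as code-point lists (PySem.Chars); String.ofList converts back.

-- ===== PORT A =====

def longest_substr (data : List (List Char)) : List Char :=
  match data with
  | [] => []  -- data[0] would raise IndexError; unreachable under Pre_ (callers pass a nonempty list)
  | word :: _ =>
    if 1 < data.length ∧ 0 < word.length then
      (PySem.List.pyRange 0 (word.length : Int)).foldl
        (fun substr i =>
          (PySem.List.pyRange 0 ((word.length : Int) - i + 1)).foldl
            (fun substr j =>
              if (substr.length : Int) < j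
                  ∧ data.all (fun x => PySem.Chars.isIn (PySem.List.slice word (some i) (some (i + j))) x) = true
              then PySem.List.slice word (some i) (some (i + j))
              else substr)
            substr)
        []
    else []

def py_split1 (w sep : List Char) : List Char × List Char :=
  -- prefix, suffix = w.split(sep, 1); the non-2-element cases are unreachable at the call site (sep ≠ '' occurs in w)
  match PySem.Chars.splitMax? w sep 1 with
  | some [p, s] => (p, s)
  | _ => ([], [])

def process_conjugations (conjugations : List (String × String × String × String × String)) : List (String × String × String × String × String × String × String) :=
  let words := conjugations.map (fun c => c.2.2.1.toList)
  let root := longest_substr words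
  conjugations.foldl
    (fun processed c =>
      let ps : List Char × List Char :=
        if root = [] then (([] : List Char), c.2.2.1.toList)
        else py_split1 c.2.2.1.toList root
      processed ++ [(c.1, c.2.1, String.ofList root, String.ofList ps.1, String.ofList ps.2, c.2.2.2.1, c.2.2.2.2)])
    []

-- ===== PORT B =====

def first_common_start (words : List (List Char)) (word : List Char) (m : Nat) : Option Nat :=
  -- the for/return loop is a first-match search; word[i:i+m] is (word.drop i).take m (= PySem.List.slice, exact)
  (List.range (word.length + 1 - m)).find?
    (fun i => words.all (fun x => PySem.Chars.isIn ((word.drop i).take m) x))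

def bsearchB (words : List (List Char)) (word : List Char) : Nat → Nat → Nat → List Char → List Char
  | 0, _, _, best => best  -- fuel only makes the while loop total; word.length + 1 is ample (hi - lo shrinks each turn)
  | fuel + 1, lo, hi, best =>
    if lo ≤ hi then
      let mid := (lo + hi) / 2
      match first_common_start words word mid with
      | none => bsearchB words word fuel lo (mid - 1) best
      | some i => bsearchB words word fuel (mid + 1) hi ((word.drop i).take mid)
    else best

def longest_common (words : List (List Char)) : List Char :=
  match words with
  | [] => []  -- words[0]: unreachable (only called when 1 < words.length)
  | word :: _ => bsearchB words word (word.length + 1) 1 word.length []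

def partitionB (w sep : List Char) : List Char × List Char :=
  -- pre, _, suf = w.partition(sep): split at the first occurrence (hand port via find; exact for sep ≠ '')
  let k := PySem.Chars.find w sep
  if k = -1 then (w, ([] : List Char))
  else (w.take k.toNat, w.drop (k.toNat + sep.length))

def process_conjugations_alt (conjugations : List (String × String × String × String × String)) : List (String × String × String × String × String × String × String) :=
  if conjugations = [] then []
  else
    let words := conjugations.map (fun c => c.2.2.1.toList)
    let root := if 1 < words.length then longest_common words else []
    conjugations.map (fun c =>
      let ps : List Char × List Char :=
        if root ≠ [] then partitionB c.2.2.1.toList root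
        else ([], c.2.2.1.toList)
      (c.1, c.2.1, String.ofList root, String.ofList ps.1, String.ofList ps.2, c.2.2.2.1, c.2.2.2.2))

-- ===== PRECONDITION & SPEC =====
-- Pre_ excludes only the empty list, on which A raises IndexError (data[0]); B returns [] there.
def Pre_process_conjugations (conjugations : List (String × String × String × String × String)) : Prop := conjugations ≠ []
instance (conjugations : List (String × String × String × String × String)) : Decidable (Pre_process_conjugations conjugations) := by unfold Pre_process_conjugations; infer_instance

def pvWitness_process_conjugations : (List (String × String × String × String × String)) :=
  [("I", "go", "running", "v", "x"), ("you", "go", "runs", "v", "y")]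

def Spec_process_conjugations (conjugations : List (String × String × String × String × String)) (out : List (String × String × String × String × String × String × String)) : Prop := out = process_conjugations_alt conjugations
instance (conjugations : List (String × String × String × String × String)) (out : List (String × String × String × String × String × String × String)) : Decidable (Spec_process_conjugations conjugations out) := by
  unfold Spec_process_conjugations
  haveI h6 : DecidableEq (String × String × String × String × String × String) := inferInstance
  haveI h7 : DecidableEq (String × String × String × String × String × String × String) :=
    @instDecidableEqProd _ _ _ h6
  infer_instance

-- ===== CLAIM (what is proved, stated in full; the proofs are below) =====
def Claim_equal_process_conjugations : Prop := ∀ (conjugations : List (String × String × String × String × String)), Dom_process_conjugations conjugations → Pre_process_conjugations conjugations → Spec_process_conjugations conjugations (process_conjugations conjugations)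

-- ===== LEMMAS AND PROOFS =====

-- `word[i:i+j] occurs in every word of data` (data includes word itself)
def Pb (data : List (List Char)) (w : List Char) (i j : Nat) : Bool :=
  data.all (fun x => PySem.Chars.isIn ((w.drop i).take j) x)

-- greatest common-substring length available at start i
def Lg (data : List (List Char)) (w : List Char) (i : Nat) : Nat :=
  Nat.findGreatest (fun j => Pb data w i j = true) (w.length - i)

-- running (best length, first start attaining it) over starts 0..k-1
def msr (data : List (List Char)) (w : List Char) : Nat → Nat × Nat
  | 0 => (0, 0)
  | k + 1 => if (msr data w k).1 < Lg data w k then (Lg data w k, k) else msr data w k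

def innerStep (data : List (List Char)) (w : List Char) (i : Nat) : List Char → Nat → List Char :=
  fun s j => if s.length < j ∧ Pb data w i j = true then (w.drop i).take j else s

def valAt (data : List (List Char)) (w : List Char) (m : Nat) : List Char :=
  if m = 0 then []
  else match first_common_start data w m with
       | some i => (w.drop i).take m
       | none => []

def Mg (data : List (List Char)) (w : List Char) : Nat :=
  Nat.findGreatest (fun m => (first_common_start data w m).isSome = true) w.length

lemma pb_mono {data : List (List Char)} {w : List Char} {i j' j : Nat} (h : j' ≤ j)
    (hp : Pb data w i j = true) : Pb data w i j' = true := by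
  unfold Pb at *
  simp only [List.all_eq_true] at *
  intro x hx
  have hx' := hp x hx
  rw [PySem.Chars.isIn_iff_infix] at *
  refine List.IsInfix.trans ?_ hx'
  have : (w.drop i).take j' = ((w.drop i).take j).take j' := by
    rw [List.take_take, min_eq_left h]
  rw [this]
  exact (List.take_prefix _ _).isInfix

lemma find?_range_eq_some {p : Nat → Bool} {n i : Nat} :
    (List.range n).find? p = some i ↔ i < n ∧ p i = true ∧ ∀ j < i, p j = false := by
  induction n generalizing i with
  | zero => simp
  | succ n ih =>
    rw [List.range_succ, List.find?_append]
    cases h : (List.range n).find? p with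
    | none =>
      have hall : ∀ j < n, p j = false := by
        intro j hj
        have := List.find?_eq_none.mp h j (List.mem_range.mpr hj)
        simpa using this
      simp only [Option.none_or, List.find?_singleton]
      by_cases hp : p n = true
      · rw [if_pos hp]
        constructor
        · simp only [Option.some.injEq]
          rintro rfl
          exact ⟨Nat.lt_succ_self n, hp, hall⟩
        · rintro ⟨hi, hpi, hmin⟩
          have : i = n := by
            rcases Nat.lt_or_ge i n with hlt | hge
            · exact absurd hpi (by simp [hall i hlt])
            · omega
          simp [this]
      · rw [if_neg hp]
        simp only [Bool.not_eq_true] at hp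
        constructor
        · rintro ⟨⟩
        · rintro ⟨hi, hpi, _hmin⟩
          have : i = n := by
            rcases Nat.lt_or_ge i n with hlt | hge
            · exact absurd hpi (by simp [hall i hlt])
            · omega
          subst this
          simp [hp] at hpi
    | some a =>
      have ha := ih.mp h
      simp only [Option.some_or]
      constructor
      · simp only [Option.some.injEq]
        rintro rfl
        exact ⟨Nat.lt_succ_of_lt ha.1, ha.2.1, ha.2.2⟩
      · rintro ⟨hi, hpi, hmin⟩
        have : i = a := by
          rcases Nat.lt_trichotomy i a with hlt | heq | hgt
          · exact absurd hpi (by simp [ha.2.2 i hlt])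
          · exact heq
          · exact absurd ha.2.1 (by simp [hmin a hgt])
        simp [this]

lemma lg_le (data : List (List Char)) (w : List Char) (i : Nat) : Lg data w i ≤ w.length - i :=
  Nat.findGreatest_le _

lemma lg_pb (data : List (List Char)) (w : List Char) (i : Nat) (h : Lg data w i ≠ 0) :
    Pb data w i (Lg data w i) = true :=
  (Nat.findGreatest_eq_iff.mp (rfl : Lg data w i = Lg data w i)).2.1 h

lemma lg_ge (data : List (List Char)) (w : List Char) (i j : Nat) (hj : j ≤ w.length - i)
    (hp : Pb data w i j = true) : j ≤ Lg data w i :=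
  Nat.le_findGreatest hj hp

lemma inner_fold (data : List (List Char)) (w : List Char) (i : Nat) (s : List Char) (k : Nat)
    (hk : k ≤ w.length - i + 1) :
    ((List.range k).foldl (innerStep data w i) s
      = if Nat.findGreatest (fun j => j < k ∧ s.length < j ∧ Pb data w i j = true) k = 0 then s
        else (w.drop i).take (Nat.findGreatest (fun j => j < k ∧ s.length < j ∧ Pb data w i j = true) k))
    ∧ ((List.range k).foldl (innerStep data w i) s).length
      = max s.length (Nat.findGreatest (fun j => j < k ∧ s.length < j ∧ Pb data w i j = true) k) := by
  induction k with
  | zero => simp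
  | succ k ih =>
    obtain ⟨hval, hlen⟩ := ih (by omega)
    rw [List.range_succ, List.foldl_append, List.foldl_cons, List.foldl_nil]
    have hGfacts := Nat.findGreatest_eq_iff.mp
      (rfl : Nat.findGreatest (fun j => j < k ∧ s.length < j ∧ Pb data w i j = true) k
        = Nat.findGreatest (fun j => j < k ∧ s.length < j ∧ Pb data w i j = true) k)
    by_cases hcond : s.length < k ∧ Pb data w i k = true
    · -- the step at j = k fires
      have hGk : Nat.findGreatest (fun j => j < k ∧ s.length < j ∧ Pb data w i j = true) k < k := by
        rcases Nat.eq_zero_or_pos (Nat.findGreatest (fun j => j < k ∧ s.length < j ∧ Pb data w i j = true) k) with h0 | hp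
        · omega
        · exact (hGfacts.2.1 (by omega)).1
      have hrlen : ((List.range k).foldl (innerStep data w i) s).length < k := by
        rw [hlen]; omega
      have hstep : innerStep data w i ((List.range k).foldl (innerStep data w i) s) k
          = (w.drop i).take k := if_pos ⟨hrlen, hcond.2⟩
      have hG' : Nat.findGreatest (fun j => j < k + 1 ∧ s.length < j ∧ Pb data w i j = true) (k + 1) = k := by
        rw [Nat.findGreatest_eq_iff]
        exact ⟨by omega, fun _ => ⟨by omega, hcond.1, hcond.2⟩, fun n hn hn' h => by omega⟩
      have hk0 : k ≠ 0 := by omega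
      rw [hstep, hG']
      refine ⟨by rw [if_neg hk0], ?_⟩
      rw [List.length_take, List.length_drop]
      omega
    · -- no update at j = k
      have hcondr : ¬ (((List.range k).foldl (innerStep data w i) s).length < k ∧ Pb data w i k = true) := by
        rintro ⟨hl, hp⟩
        rw [hlen] at hl
        exact hcond ⟨by omega, hp⟩
      have hnostep : innerStep data w i ((List.range k).foldl (innerStep data w i) s) k
          = (List.range k).foldl (innerStep data w i) s := if_neg hcondr
      have hG' : Nat.findGreatest (fun j => j < k + 1 ∧ s.length < j ∧ Pb data w i j = true) (k + 1)
          = Nat.findGreatest (fun j => j < k ∧ s.length < j ∧ Pb data w i j = true) k := by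
        rw [Nat.findGreatest_eq_iff]
        refine ⟨by omega, fun h0 => ?_, fun n hn hn' => ?_⟩
        · obtain ⟨h1, h2, h3⟩ := hGfacts.2.1 h0
          exact ⟨by omega, h2, h3⟩
        · rintro ⟨hn1, hn2, hn3⟩
          rcases Nat.lt_or_ge n k with hnk | hnk
          · exact Nat.findGreatest_is_greatest hn (by omega) ⟨hnk, hn2, hn3⟩
          · have : n = k := by omega
            subst this
            exact hcond ⟨hn2, hn3⟩
      rw [hnostep, hG']
      exact ⟨hval, hlen⟩

lemma inner_total (data : List (List Char)) (w : List Char) (i : Nat) (s : List Char) :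
    ((List.range (w.length - i + 1)).foldl (innerStep data w i) s
      = if s.length < Lg data w i then (w.drop i).take (Lg data w i) else s)
    ∧ ((List.range (w.length - i + 1)).foldl (innerStep data w i) s).length
      = max s.length (Lg data w i) := by
  obtain ⟨hval, hlen⟩ := inner_fold data w i s (w.length - i + 1) le_rfl
  by_cases hs : s.length < Lg data w i
  · have hG : Nat.findGreatest (fun j => j < w.length - i + 1 ∧ s.length < j ∧ Pb data w i j = true) (w.length - i + 1)
        = Lg data w i := by
      rw [Nat.findGreatest_eq_iff]
      have hle := lg_le data w i
      refine ⟨by omega, fun _ => ⟨by omega, hs, lg_pb data w i (by omega)⟩, fun n hn hn' => ?_⟩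
      rintro ⟨hn1, hn2, hn3⟩
      have := lg_ge data w i n (by omega) hn3
      omega
    rw [hG] at hval hlen
    have hL0 : Lg data w i ≠ 0 := by omega
    rw [if_neg hL0] at hval
    rw [if_pos hs]
    exact ⟨hval, hlen⟩
  · have hG : Nat.findGreatest (fun j => j < w.length - i + 1 ∧ s.length < j ∧ Pb data w i j = true) (w.length - i + 1)
        = 0 := by
      rw [Nat.findGreatest_eq_zero_iff]
      rintro n h0 hn ⟨hn1, hn2, hn3⟩
      have := lg_ge data w i n (by omega) hn3
      omega
    rw [hG] at hval hlen
    rw [if_pos rfl] at hval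
    rw [if_neg hs]
    exact ⟨hval, by rw [hlen]; omega⟩

lemma outer_fold (data : List (List Char)) (w : List Char) (k : Nat) :
    ((List.range k).foldl (fun s i => (List.range (w.length - i + 1)).foldl (innerStep data w i) s) []
      = (if (msr data w k).1 = 0 then [] else (w.drop (msr data w k).2).take (msr data w k).1))
    ∧ ((List.range k).foldl (fun s i => (List.range (w.length - i + 1)).foldl (innerStep data w i) s) []).length
      = (msr data w k).1 := by
  induction k with
  | zero => simp [msr]
  | succ k ih =>
    obtain ⟨hval, hlen⟩ := ih
    rw [List.range_succ, List.foldl_append, List.foldl_cons, List.foldl_nil]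
    obtain ⟨hv, hl⟩ := inner_total data w k ((List.range k).foldl (fun s i => (List.range (w.length - i + 1)).foldl (innerStep data w i) s) [])
    by_cases h : (msr data w k).1 < Lg data w k
    · have hmsr : msr data w (k + 1) = (Lg data w k, k) := by
        simp only [msr, if_pos h]
      rw [hlen] at hv hl
      rw [if_pos h] at hv
      rw [hmsr, hv]
      have hL0 : Lg data w k ≠ 0 := by omega
      refine ⟨by rw [if_neg hL0], ?_⟩
      rw [List.length_take, List.length_drop]
      have := lg_le data w k
      simp only
      omega
    · have hmsr : msr data w (k + 1) = msr data w k := by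
        simp only [msr, if_neg h]
      rw [hlen] at hv hl
      rw [if_neg h] at hv
      rw [hmsr, hv]
      exact ⟨hval, hlen⟩

lemma msr_ub (data : List (List Char)) (w : List Char) (k : Nat) :
    ∀ i < k, Lg data w i ≤ (msr data w k).1 := by
  induction k with
  | zero => omega
  | succ k ih =>
    intro i hi
    by_cases h : (msr data w k).1 < Lg data w k
    · have hmsr : msr data w (k + 1) = (Lg data w k, k) := by simp only [msr, if_pos h]
      rw [hmsr]
      rcases Nat.lt_or_ge i k with hik | hik
      · have := ih i hik
        simp only
        omega
      · have : i = k := by omega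
        subst this
        exact le_rfl
    · have hmsr : msr data w (k + 1) = msr data w k := by simp only [msr, if_neg h]
      rw [hmsr]
      rcases Nat.lt_or_ge i k with hik | hik
      · exact ih i hik
      · have : i = k := by omega
        subst this
        omega

lemma msr_spec (data : List (List Char)) (w : List Char) (k : Nat) (h : (msr data w k).1 ≠ 0) :
    (msr data w k).2 < k ∧ Lg data w (msr data w k).2 = (msr data w k).1 ∧
      ∀ i < (msr data w k).2, Lg data w i < (msr data w k).1 := by
  induction k with
  | zero => simp [msr] at h
  | succ k ih =>
    by_cases h' : (msr data w k).1 < Lg data w k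
    · have hmsr : msr data w (k + 1) = (Lg data w k, k) := by simp only [msr, if_pos h']
      rw [hmsr]
      refine ⟨by omega, rfl, fun i hi => ?_⟩
      have := msr_ub data w k i hi
      simp only at *
      omega
    · have hmsr : msr data w (k + 1) = msr data w k := by simp only [msr, if_neg h']
      rw [hmsr] at h ⊢
      obtain ⟨h1, h2, h3⟩ := ih h
      exact ⟨by omega, h2, h3⟩

lemma A_fold (w : List Char) (rest : List (List Char)) (hg : 1 < (w :: rest).length ∧ 0 < w.length) :
    longest_substr (w :: rest)
      = (List.range w.length).foldl
          (fun s i => (List.range (w.length - i + 1)).foldl (innerStep (w :: rest) w i) s) [] := by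
  show (if 1 < (w :: rest).length ∧ 0 < w.length then _ else _) = _
  rw [if_pos hg, PySem.List.pyRange_zero_natCast, List.foldl_map]
  refine PySem.List.foldl_congr_mem' _ _ _ _ ?_
  intro i hi s
  have hi' : i < w.length := List.mem_range.mp hi
  have hcast : (w.length : Int) - (i : Int) + 1 = ((w.length - i + 1 : Nat) : Int) := by omega
  rw [hcast, PySem.List.pyRange_zero_natCast, List.foldl_map]
  refine PySem.List.foldl_congr_mem' _ _ _ _ ?_
  intro j hj s'
  unfold innerStep Pb
  rw [PySem.List.slice_natCast_add]
  simp only [Nat.cast_lt]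

lemma fcs_isSome_iff (data : List (List Char)) (w : List Char) (m : Nat) :
    (first_common_start data w m).isSome = true ↔ ∃ i, i < w.length + 1 - m ∧ Pb data w i m = true := by
  unfold first_common_start
  rw [List.find?_isSome]
  constructor
  · rintro ⟨i, hi, hp⟩
    exact ⟨i, List.mem_range.mp hi, hp⟩
  · rintro ⟨i, hi, hp⟩
    exact ⟨i, List.mem_range.mpr hi, hp⟩

lemma fcs_mono (data : List (List Char)) (w : List Char) {m' m : Nat} (h : m' ≤ m)
    (hq : (first_common_start data w m).isSome = true) :
    (first_common_start data w m').isSome = true := by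
  rw [fcs_isSome_iff] at *
  rcases hq with ⟨i, hi, hp⟩
  exact ⟨i, by omega, pb_mono h hp⟩

lemma mg_eq (data : List (List Char)) (w : List Char) (hi : Nat) (hhi : hi ≤ w.length)
    (inv1 : ∀ m, 0 < m → m ≤ hi → (first_common_start data w m).isSome = true)
    (inv2 : ∀ m, hi < m → m ≤ w.length → ¬ (first_common_start data w m).isSome = true) :
    Mg data w = hi := by
  unfold Mg
  rw [Nat.findGreatest_eq_iff]
  exact ⟨hhi, fun h0 => inv1 hi (by omega) le_rfl, fun n hn hnl => inv2 n hn hnl⟩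

lemma bs_spec (data : List (List Char)) (w : List Char) :
    ∀ fuel lo hi best, 1 ≤ lo → lo ≤ hi + 1 → hi ≤ w.length → hi + 1 - lo ≤ fuel →
    (∀ m, 0 < m → m < lo → (first_common_start data w m).isSome = true) →
    (∀ m, hi < m → m ≤ w.length → ¬ (first_common_start data w m).isSome = true) →
    best = valAt data w (lo - 1) →
    bsearchB data w fuel lo hi best = valAt data w (Mg data w) := by
  intro fuel
  induction fuel with
  | zero =>
    intro lo hi best h1 h2 h3 h4 inv1 inv2 hbest
    have hlo : lo = hi + 1 := by omega
    have : Mg data w = hi := mg_eq data w hi h3 (fun m hm hmhi => inv1 m hm (by omega)) inv2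
    rw [this]
    simpa [bsearchB, hlo] using hbest
  | succ fuel ih =>
    intro lo hi best h1 h2 h3 h4 inv1 inv2 hbest
    by_cases hlh : lo ≤ hi
    · have hmidlo : lo ≤ (lo + hi) / 2 := by omega
      have hmidhi : (lo + hi) / 2 ≤ hi := by omega
      cases hfc : first_common_start data w ((lo + hi) / 2) with
      | none =>
        have hb : bsearchB data w (fuel + 1) lo hi best
            = bsearchB data w fuel lo ((lo + hi) / 2 - 1) best := by
          simp [bsearchB, hlh, hfc]
        rw [hb]
        refine ih lo ((lo + hi) / 2 - 1) best h1 (by omega) (by omega) (by omega) inv1 ?_ hbest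
        intro m hm hml hsome
        have : (first_common_start data w ((lo + hi) / 2)).isSome = true :=
          fcs_mono data w (by omega) hsome
        simp [hfc] at this
      | some i =>
        have hb : bsearchB data w (fuel + 1) lo hi best
            = bsearchB data w fuel ((lo + hi) / 2 + 1) hi ((w.drop i).take ((lo + hi) / 2)) := by
          simp [bsearchB, hlh, hfc]
        rw [hb]
        refine ih ((lo + hi) / 2 + 1) hi _ (by omega) (by omega) h3 (by omega) ?_ inv2 ?_
        · intro m hm hml
          exact fcs_mono data w (show m ≤ (lo + hi) / 2 by omega) (by rw [hfc]; rfl)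
        · have hmid0 : (lo + hi) / 2 ≠ 0 := by omega
          simp [valAt, hmid0, hfc]
    · have hlo : lo = hi + 1 := by omega
      have : Mg data w = hi := mg_eq data w hi h3 (fun m hm hmhi => inv1 m hm (by omega)) inv2
      rw [this]
      simpa [bsearchB, hlh, hlo] using hbest

lemma B_root (w : List Char) (rest : List (List Char)) :
    longest_common (w :: rest) = valAt (w :: rest) w (Mg (w :: rest) w) := by
  show bsearchB (w :: rest) w (w.length + 1) 1 w.length [] = _
  refine bs_spec (w :: rest) w (w.length + 1) 1 w.length [] (by omega) (by omega) le_rfl (by omega)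
    (fun m hm hml => by omega) (fun m hm hml => by omega) ?_
  simp [valAt]

lemma main_root (w : List Char) (rest : List (List Char)) (hr : rest ≠ []) :
    longest_substr (w :: rest) = longest_common (w :: rest) := by
  have hrl : rest.length ≠ 0 := by simpa [List.length_eq_zero_iff] using hr
  have hlen2 : 1 < (w :: rest).length := by simp [List.length_cons]; omega
  by_cases hw : 0 < w.length
  · rw [A_fold w rest ⟨hlen2, hw⟩, (outer_fold (w :: rest) w w.length).1, B_root]
    by_cases hm : (msr (w :: rest) w w.length).1 = 0
    · rw [if_pos hm]
      have hMg : Mg (w :: rest) w = 0 := by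
        unfold Mg
        rw [Nat.findGreatest_eq_zero_iff]
        intro n h0 hn hsome
        obtain ⟨i, hi, hpb⟩ := (fcs_isSome_iff _ _ _).mp hsome
        have hiw : i < w.length := by omega
        have h1 := lg_ge (w :: rest) w i n (by omega) hpb
        have h2 := msr_ub (w :: rest) w w.length i hiw
        omega
      rw [hMg]
      simp [valAt]
    · obtain ⟨hiS, hLiS, hminS⟩ := msr_spec (w :: rest) w w.length hm
      have hpbm : Pb (w :: rest) w (msr (w :: rest) w w.length).2 (msr (w :: rest) w w.length).1 = true := by
        rw [← hLiS]
        exact lg_pb _ _ _ (by omega)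
      have hmle : (msr (w :: rest) w w.length).1 ≤ w.length - (msr (w :: rest) w w.length).2 :=
        hLiS ▸ lg_le (w :: rest) w (msr (w :: rest) w w.length).2
      have hMg : Mg (w :: rest) w = (msr (w :: rest) w w.length).1 := by
        unfold Mg
        rw [Nat.findGreatest_eq_iff]
        refine ⟨by omega, fun _ => ?_, fun n hn hnl hsome => ?_⟩
        · rw [fcs_isSome_iff]
          exact ⟨(msr (w :: rest) w w.length).2, by omega, hpbm⟩
        · obtain ⟨i, hi, hpb⟩ := (fcs_isSome_iff _ _ _).mp hsome
          have hiw : i < w.length := by omega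
          have h1 := lg_ge (w :: rest) w i n (by omega) hpb
          have h2 := msr_ub (w :: rest) w w.length i hiw
          omega
      rw [hMg, if_neg hm]
      unfold valAt
      rw [if_neg hm]
      have hfc : first_common_start (w :: rest) w (msr (w :: rest) w w.length).1
          = some (msr (w :: rest) w w.length).2 := by
        unfold first_common_start
        rw [find?_range_eq_some]
        refine ⟨by omega, hpbm, fun j hj => ?_⟩
        by_contra hb
        rw [Bool.not_eq_false] at hb
        have h1 := lg_ge (w :: rest) w j (msr (w :: rest) w w.length).1 (by omega) hb
        have h2 := hminS j hj
        omega
      rw [hfc]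
  · have hw0 : w.length = 0 := by omega
    have hA : longest_substr (w :: rest) = [] := by
      show (if 1 < (w :: rest).length ∧ 0 < w.length then _ else _) = _
      rw [if_neg]
      rintro ⟨_, h⟩
      omega
    have hB : longest_common (w :: rest) = [] := by
      show bsearchB (w :: rest) w (w.length + 1) 1 w.length [] = []
      rw [hw0]
      simp [bsearchB]
    rw [hA, hB]

lemma root_common (w : List Char) (rest : List (List Char)) (x : List Char) (hx : x ∈ w :: rest)
    (hne : longest_substr (w :: rest) ≠ []) : longest_substr (w :: rest) <:+: x := by
  by_cases hg : 1 < (w :: rest).length ∧ 0 < w.length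
  · rw [A_fold w rest hg, (outer_fold (w :: rest) w w.length).1] at hne ⊢
    by_cases hm : (msr (w :: rest) w w.length).1 = 0
    · rw [if_pos hm] at hne
      exact absurd rfl hne
    · rw [if_neg hm]
      obtain ⟨hiS, hLiS, _⟩ := msr_spec (w :: rest) w w.length hm
      have hpbm : Pb (w :: rest) w (msr (w :: rest) w w.length).2 (msr (w :: rest) w w.length).1 = true := by
        rw [← hLiS]
        exact lg_pb _ _ _ (by omega)
      unfold Pb at hpbm
      rw [List.all_eq_true] at hpbm
      have := hpbm x hx
      rwa [PySem.Chars.isIn_iff_infix] at this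
  · exfalso
    apply hne
    show (if 1 < (w :: rest).length ∧ 0 < w.length then _ else _) = _
    rw [if_neg hg]

lemma go_zero (sep : List Char) (fuel : Nat) (l : List Char) (acc : List (List Char)) :
    PySem.Chars.splitOnMax.go sep fuel 0 l [] acc = acc.reverse ++ [l] := by
  cases fuel with
  | zero => simp [PySem.Chars.splitOnMax.go]
  | succ f =>
    cases l with
    | nil => simp [PySem.Chars.splitOnMax.go]
    | cons c rest => simp [PySem.Chars.splitOnMax.go]

lemma go_one (sep : List Char) (hsep : sep ≠ []) :
    ∀ (l : List Char) (fuel : Nat) (cur : List Char) (acc : List (List Char)) (k : Nat),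
      l.length + 1 ≤ fuel → sep <+: l.drop k → (∀ i < k, ¬ sep <+: l.drop i) →
      PySem.Chars.splitOnMax.go sep fuel 1 l cur acc
        = acc.reverse ++ [cur.reverse ++ l.take k, l.drop (k + sep.length)] := by
  intro l
  induction l with
  | nil =>
    intro fuel cur acc k _ hpre _
    simp only [List.drop_nil] at hpre
    exact absurd (List.prefix_nil.mp hpre) hsep
  | cons c rest ih =>
    intro fuel cur acc k hfuel hpre hmin
    obtain ⟨f, rfl⟩ : ∃ f, fuel = f + 1 := ⟨fuel - 1, by omega⟩
    by_cases hp : sep.isPrefixOf (c :: rest) = true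
    · have hk0 : k = 0 := by
        by_contra hk
        exact hmin 0 (by omega) (by simpa using (List.isPrefixOf_iff_prefix.mp hp))
      subst hk0
      have : PySem.Chars.splitOnMax.go sep (f + 1) 1 (c :: rest) cur acc
          = PySem.Chars.splitOnMax.go sep f 0 ((c :: rest).drop sep.length) [] (cur.reverse :: acc) := by
        simp [PySem.Chars.splitOnMax.go, hp]
      rw [this, go_zero]
      simp
    · have hk1 : 1 ≤ k := by
        rcases Nat.eq_zero_or_pos k with h0 | h1
        · subst h0
          simp only [List.drop_zero] at hpre
          exact absurd (List.isPrefixOf_iff_prefix.mpr hpre) hp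
        · exact h1
      obtain ⟨k', rfl⟩ : ∃ k', k = k' + 1 := ⟨k - 1, by omega⟩
      have hstep : PySem.Chars.splitOnMax.go sep (f + 1) 1 (c :: rest) cur acc
          = PySem.Chars.splitOnMax.go sep f 1 rest (c :: cur) acc := by
        simp [PySem.Chars.splitOnMax.go, hp]
      rw [hstep, ih f (c :: cur) acc k' (by simpa using Nat.lt_of_succ_lt_succ (Nat.lt_of_lt_of_le (Nat.lt_succ_self _) hfuel)) (by simpa using hpre) (fun i hi => by simpa using hmin (i + 1) (by omega))]
      simp [List.take_succ_cons, List.drop_succ_cons, Nat.succ_add]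

lemma split1_eq_partition (w sep : List Char) (hsep : sep ≠ []) (hin : sep <:+: w) :
    py_split1 w sep = partitionB w sep := by
  have hfind0 : 0 ≤ PySem.Chars.find w sep := (PySem.Chars.find_nonneg_iff w sep).mpr hin
  obtain ⟨hpre, hmin⟩ := PySem.Chars.find_spec hfind0
  have hne : ¬ PySem.Chars.find w sep = -1 := by omega
  unfold py_split1 partitionB
  have hs : PySem.Chars.splitMax? w sep 1 = some (PySem.Chars.splitOnMax.go sep (w.length + 1) 1 w [] []) := by
    unfold PySem.Chars.splitMax? PySem.Chars.splitOnMax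
    simp [hsep]
  rw [hs, go_one sep hsep w (w.length + 1) [] [] (PySem.Chars.find w sep).toNat (by omega) hpre hmin]
  simp [hne]

lemma rows_eq (conj : List (String × String × String × String × String)) (root : List Char)
    (hroot : ∀ cc ∈ conj, root ≠ [] → root <:+: cc.2.2.1.toList) :
    conj.foldl (fun processed c =>
      processed ++ [(c.1, c.2.1, String.ofList root,
        String.ofList (if root = [] then (([] : List Char), c.2.2.1.toList) else py_split1 c.2.2.1.toList root).1,
        String.ofList (if root = [] then (([] : List Char), c.2.2.1.toList) else py_split1 c.2.2.1.toList root).2,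
        c.2.2.2.1, c.2.2.2.2)]) []
    = conj.map (fun c =>
        (c.1, c.2.1, String.ofList root,
         String.ofList (if root ≠ [] then partitionB c.2.2.1.toList root else ([], c.2.2.1.toList)).1,
         String.ofList (if root ≠ [] then partitionB c.2.2.1.toList root else ([], c.2.2.1.toList)).2,
         c.2.2.2.1, c.2.2.2.2)) := by
  rw [PySem.List.foldl_append_singleton_eq_map, List.nil_append]
  apply List.map_congr_left
  intro c hc
  by_cases hr : root = []
  · simp [hr]
  · rw [if_neg hr, if_pos hr, split1_eq_partition c.2.2.1.toList root hr (hroot c hc hr)]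

-- ===== VERDICT (by name: the statement is the Claim_ definition above) =====
theorem process_conjugations_spec : Claim_equal_process_conjugations := by
  unfold Claim_equal_process_conjugations
  intro conj _hdom hpre
  unfold Spec_process_conjugations
  cases conj with
  | nil => exact absurd rfl hpre
  | cons c cs =>
    simp only [process_conjugations, process_conjugations_alt, List.map_cons,
      if_neg (List.cons_ne_nil c cs)]
    have hroots : longest_substr (c.2.2.1.toList :: cs.map (fun c => c.2.2.1.toList))
        = (if 1 < (c.2.2.1.toList :: cs.map (fun c => c.2.2.1.toList)).length
           then longest_common (c.2.2.1.toList :: cs.map (fun c => c.2.2.1.toList)) else []) := by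
      cases cs with
      | nil => simp [longest_substr]
      | cons c2 cs2 =>
        rw [if_pos (by simp [List.length_cons])]
        exact main_root _ _ (by simp)
    rw [← hroots]
    exact rows_eq (c :: cs) _ (fun cc hcc hne =>
      root_common _ _ _ (by
        rcases List.mem_cons.mp hcc with rfl | hcc
        · exact List.mem_cons_self ..
        · exact List.mem_cons_of_mem _ (List.mem_map_of_mem hcc)) hne)
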